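-- pv_equiv track=rewrite | github.com/JesusColinV/Genetic_variability_Covid_MX | utils.py | get_quinquenios
-- ===== SOURCE A (Python) =====
-- def get_quinquenios(val:int):
--     """ Given an age number recognizes to which five-year period it belongs
--
--     Args:
--         val (int): Age
--
--     Returns:
--         val (int): Age
--         k (int): five-year period in which it was classified
--     """
--
--     age_quinquennia = {
--         -1:[-1],
--         1: [0],
--         2:range(1,5),
--         3:range(5,10),
--         4:range(10,15),
--         5:range(15,20),
--         6:range(20,30),
--         7:range(30,40),
--         8:range(40,50),
--         9:range(50,60),
--         10:range(60,150)
--     }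
--
--     # goes through the five-year period to determine which classification it belongs to
--     for k,v in age_quinquennia.items():
--         if val in v:
--             return (val,k)
-- ===== SOURCE B (Python) =====
-- # Closed-form arithmetic classification: no bucket table, labels computed by floor division.
-- def get_quinquenios(val: int):
--     if val == -1:
--         k = -1
--     elif val == 0:
--         k = 1
--     elif 1 <= val < 20:
--         k = val // 5 + 2
--     elif 20 <= val < 60:
--         k = val // 10 + 4
--     elif 60 <= val < 150:
--         k = 10
--     else:
--         return None
--     return (val, k)
-- ===== Notes on version B (the rewrite author's own statement) =====
-- stated objective: alternative
-- what changed: B replaces A's scan over a dict of bucket ranges with a closed-form arithmetic classification (floor division by 5 or 10 plus an offset), using no table at all.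
import Mathlib
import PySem

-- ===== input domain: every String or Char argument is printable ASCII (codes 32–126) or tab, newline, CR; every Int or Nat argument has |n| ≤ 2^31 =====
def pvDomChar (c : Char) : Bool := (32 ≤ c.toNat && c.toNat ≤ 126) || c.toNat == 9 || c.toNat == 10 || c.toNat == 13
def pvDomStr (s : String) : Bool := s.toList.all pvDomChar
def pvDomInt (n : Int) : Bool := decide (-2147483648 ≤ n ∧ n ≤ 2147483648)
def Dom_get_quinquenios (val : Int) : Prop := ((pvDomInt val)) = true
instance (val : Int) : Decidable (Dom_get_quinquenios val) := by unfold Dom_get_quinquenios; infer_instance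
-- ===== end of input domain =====

-- B replaces A's scan over bucket ranges with a closed-form arithmetic classification.


-- ===== PORT A =====
-- A scans the fixed bucket dict and returns (val, k) for the first bucket containing val.
def pvBuckets : List (Int × List Int) :=
  [(-1, [(-1 : Int)]), (1, [0]),
   (2, PySem.List.pyRange 1 5 1), (3, PySem.List.pyRange 5 10 1),
   (4, PySem.List.pyRange 10 15 1), (5, PySem.List.pyRange 15 20 1),
   (6, PySem.List.pyRange 20 30 1), (7, PySem.List.pyRange 30 40 1),
   (8, PySem.List.pyRange 40 50 1), (9, PySem.List.pyRange 50 60 1),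
   (10, PySem.List.pyRange 60 150 1)]

def get_quinquenios (val : Int) : Option (Int × Int) :=
  (pvBuckets.find? (fun kv => decide (val ∈ kv.2))).map (fun kv => (val, kv.1))

-- ===== PORT B =====
-- B computes the label arithmetically: floor division by 5 or 10 plus an offset.
def get_quinquenios_alt (val : Int) : Option (Int × Int) :=
  if val = -1 then some (val, -1)
  else if val = 0 then some (val, 1)
  else if 1 ≤ val ∧ val < 20 then some (val, PySem.Int.floordiv val 5 + 2)
  else if 20 ≤ val ∧ val < 60 then some (val, PySem.Int.floordiv val 10 + 4)
  else if 60 ≤ val ∧ val < 150 then some (val, 10)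
  else none

-- ===== PRECONDITION & SPEC =====
def Spec_get_quinquenios (val : Int) (out : Option (Int × Int)) : Prop := out = get_quinquenios_alt val
instance (val : Int) (out : Option (Int × Int)) : Decidable (Spec_get_quinquenios val out) := by unfold Spec_get_quinquenios; infer_instance

-- ===== CLAIM (what is proved, stated in full; the proofs are below) =====
def Claim_equal_get_quinquenios : Prop := ∀ (val : Int), Dom_get_quinquenios val → Spec_get_quinquenios val (get_quinquenios val)

-- ===== LEMMAS AND PROOFS =====

lemma out_of_range_eq (val : Int) (h : ¬ (-1 ≤ val ∧ val < 150)) :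
    get_quinquenios val = get_quinquenios_alt val := by
  have ha : get_quinquenios val = none := by
    unfold get_quinquenios
    rw [List.find?_eq_none.mpr]
    · rfl
    · intro kv hkv
      simp only [pvBuckets, List.mem_cons, List.not_mem_nil, or_false] at hkv
      rcases hkv with h1|h1|h1|h1|h1|h1|h1|h1|h1|h1|h1 <;> subst h1 <;>
        simp [PySem.List.mem_pyRange_one] <;> omega
  have hb : get_quinquenios_alt val = none := by
    unfold get_quinquenios_alt
    split_ifs with h1 h2 h3 h4 h5 <;> first | rfl | omega
  rw [ha, hb]

-- ===== VERDICT (by name: the statement is the Claim_ definition above) =====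
theorem get_quinquenios_spec : Claim_equal_get_quinquenios := by
  intro val _
  unfold Spec_get_quinquenios
  by_cases h : -1 ≤ val ∧ val < 150
  · obtain ⟨h1, h2⟩ := h
    interval_cases val <;> (set_option maxRecDepth 8192 in decide)
  · exact out_of_range_eq val h
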